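-- pv_equiv track=rewrite | github.com/ghost-in-moss/GhostOS | ghostiss/blueprint/moos/reflect.py | add_source_indent
-- ===== SOURCE A (Python) =====
-- def add_source_indent(source: str, indent: int = 4) -> str:
--     """
--     给代码添加前缀
--     """
--     lines = source.split('\n')
--     result = []
--     indent_str = ' ' * indent
--     for line in lines:
--         if line.strip():
--             line = indent_str + line
--         result.append(line)
--     return "\n".join(result)
-- ===== SOURCE B (Python) =====
-- def add_source_indent(source: str, indent: int = 4) -> str:
--     # single character-level pass: buffer leading whitespace of each line and
--     # decide at the first non-whitespace char (or line end) whether to indent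
--     pad = ' ' * indent
--     out = []
--     ws = []
--     seen = False
--     for ch in source:
--         if ch == '\n':
--             out.extend(ws)
--             ws = []
--             out.append('\n')
--             seen = False
--         elif not seen and ch.isspace():
--             ws.append(ch)
--         elif not seen:
--             seen = True
--             out.append(pad)
--             out.extend(ws)
--             ws = []
--             out.append(ch)
--         else:
--             out.append(ch)
--     out.extend(ws)
--     return ''.join(out)
-- ===== Notes on version B (the rewrite author's own statement) =====
-- stated objective: alternative
-- what changed: Replaced the split-into-lines / per-line strip test / join pipeline with a single character-level pass that buffers each line's leading whitespace and inserts the indent at the first non-whitespace character, leaving blank lines untouched.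
import Mathlib
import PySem

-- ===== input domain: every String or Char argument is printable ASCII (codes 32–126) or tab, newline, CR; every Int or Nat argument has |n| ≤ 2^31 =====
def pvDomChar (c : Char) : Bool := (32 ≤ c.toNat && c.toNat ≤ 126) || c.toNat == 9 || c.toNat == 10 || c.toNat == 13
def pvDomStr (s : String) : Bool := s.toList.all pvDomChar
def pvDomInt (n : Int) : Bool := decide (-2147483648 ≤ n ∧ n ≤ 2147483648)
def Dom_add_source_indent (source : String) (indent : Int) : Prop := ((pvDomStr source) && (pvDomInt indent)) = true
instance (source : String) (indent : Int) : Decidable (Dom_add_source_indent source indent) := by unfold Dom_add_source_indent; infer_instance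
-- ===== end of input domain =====

-- B replaces split/strip/join by one character-level pass that buffers each line's
-- leading whitespace and indents at the first non-whitespace character (alternative, same cost).

-- ===== PORT A =====
-- literal port of A: split on '\n', indent each line with non-whitespace content, join back
def add_source_indent (source : String) (indent : Int) : String :=
  let lines := PySem.Chars.splitOn source.toList ['\n']
  let indentStr := PySem.List.pyRepeat [' '] indent
  let result := lines.foldl
    (fun result line =>
      result ++ [if PySem.Chars.strip line ≠ [] then indentStr ++ line else line]) []
  String.ofList (PySem.Chars.join ['\n'] result)

-- ===== PORT B =====
-- one step of B's loop over the characters: state = (out, ws buffer, seen non-ws on this line)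
def altStep (pad : List Char) (st : List Char × List Char × Bool) (ch : Char) :
    List Char × List Char × Bool :=
  let (out, ws, seen) := st
  if ch = '\n' then (out ++ ws ++ ['\n'], [], false)
  else if !seen && PySem.Chars.isspace ch then (out, ws ++ [ch], false)
  else if !seen then (out ++ pad ++ ws ++ [ch], [], true)
  else (out ++ [ch], ws, seen)

def add_source_indent_alt (source : String) (indent : Int) : String :=
  let pad := PySem.List.pyRepeat [' '] indent
  let st := source.toList.foldl (altStep pad) ([], [], false)
  String.ofList (st.1 ++ st.2.1)

-- ===== PRECONDITION & SPEC =====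
def Spec_add_source_indent (source : String) (indent : Int) (out : String) : Prop := out = add_source_indent_alt source indent
instance (source : String) (indent : Int) (out : String) : Decidable (Spec_add_source_indent source indent out) := by unfold Spec_add_source_indent; infer_instance

-- ===== CLAIM (what is proved, stated in full; the proofs are below) =====
def Claim_equal_add_source_indent : Prop := ∀ (source : String) (indent : Int), Dom_add_source_indent source indent → Spec_add_source_indent source indent (add_source_indent source indent)

-- ===== LEMMAS AND PROOFS =====

-- structural split of a char list at '\n', with the pending prefix of the current line
def mySplit (pre : List Char) : List Char → List (List Char)
  | [] => [pre]
  | c :: r => if c = '\n' then pre :: mySplit [] r else mySplit (pre ++ [c]) r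

-- the indent decision A makes per line
def gLine (pad line : List Char) : List Char :=
  if PySem.Chars.strip line ≠ [] then pad ++ line else line

-- what B emits after the first non-whitespace char of a line has been seen
def joinSeen (pad : List Char) : List Char → List Char
  | [] => []
  | c :: r => if c = '\n' then
      '\n' :: PySem.Chars.join ['\n'] ((mySplit [] r).map (gLine pad))
    else c :: joinSeen pad r

lemma mySplit_ne_nil (pre : List Char) (cs : List Char) : mySplit pre cs ≠ [] := by
  induction cs generalizing pre with
  | nil => simp [mySplit]
  | cons c r ih => by_cases h : c = '\n' <;> simp [mySplit, h, ih]

lemma go_eq (fuel : Nat) (l cur : List Char) (acc : List (List Char)) (h : l.length < fuel) :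
    PySem.Chars.splitOn.go ['\n'] fuel l cur acc = acc.reverse ++ mySplit cur.reverse l := by
  induction fuel generalizing l cur acc with
  | zero => omega
  | succ fuel ih =>
    cases l with
    | nil => simp [PySem.Chars.splitOn.go, mySplit]
    | cons c rest =>
      by_cases hc : c = '\n'
      · subst hc
        have hstep : PySem.Chars.splitOn.go ['\n'] (fuel+1) ('\n'::rest) cur acc
            = PySem.Chars.splitOn.go ['\n'] fuel rest [] (cur.reverse :: acc) := by
          simp [PySem.Chars.splitOn.go, List.isPrefixOf]
        rw [hstep, ih rest [] (cur.reverse :: acc) (by simp at h ⊢; omega)]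
        simp [mySplit]
      · have hstep : PySem.Chars.splitOn.go ['\n'] (fuel+1) (c::rest) cur acc
            = PySem.Chars.splitOn.go ['\n'] fuel rest (c :: cur) acc := by
          simp [PySem.Chars.splitOn.go, List.isPrefixOf, Ne.symm hc]
        rw [hstep, ih rest (c :: cur) acc (by simp at h ⊢; omega)]
        simp [mySplit, hc]

lemma splitOn_eq (cs : List Char) : PySem.Chars.splitOn cs ['\n'] = mySplit [] cs := by
  unfold PySem.Chars.splitOn
  rw [go_eq (cs.length + 1) cs [] [] (by omega)]
  simp

lemma foldl_append_map (pad : List Char) (lines : List (List Char)) (acc : List (List Char)) :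
    lines.foldl (fun result line =>
      result ++ [if PySem.Chars.strip line ≠ [] then pad ++ line else line]) acc
      = acc ++ lines.map (gLine pad) := by
  induction lines generalizing acc with
  | nil => simp
  | cons l ls ih =>
    rw [List.foldl_cons, ih]
    simp [gLine]

lemma strip_eq_nil_iff (l : List Char) :
    PySem.Chars.strip l = [] ↔ l.all PySem.Chars.isspace = true := by
  unfold PySem.Chars.strip PySem.Chars.rstrip PySem.Chars.lstrip
  constructor
  · intro h
    have h2 : ∀ x ∈ l.dropWhile PySem.Chars.isspace, PySem.Chars.isspace x = true := by
      intro x hx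
      have : x ∈ (l.dropWhile PySem.Chars.isspace).reverse := by simpa using hx
      have h3 : (l.dropWhile PySem.Chars.isspace).reverse.dropWhile PySem.Chars.isspace = [] := by
        simpa using h
      exact List.dropWhile_eq_nil_iff.mp h3 x this
    simp only [List.all_eq_true]
    intro x hx
    have : x ∈ l.takeWhile PySem.Chars.isspace ∨ x ∈ l.dropWhile PySem.Chars.isspace := by
      rw [← List.mem_append, List.takeWhile_append_dropWhile]; exact hx
    rcases this with h1 | h1
    · exact List.mem_takeWhile_imp h1
    · exact h2 x h1
  · intro h
    have : l.dropWhile PySem.Chars.isspace = [] := by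
      rw [List.dropWhile_eq_nil_iff]
      intro x hx; exact List.all_eq_true.mp h x hx
    simp [this]

lemma gLine_blank (pad l : List Char) (h : l.all PySem.Chars.isspace = true) :
    gLine pad l = l := by
  unfold gLine
  rw [if_neg]; simp [strip_eq_nil_iff, h]

lemma gLine_nonblank (pad l : List Char) (h : ¬ l.all PySem.Chars.isspace = true) :
    gLine pad l = pad ++ l := by
  unfold gLine
  rw [if_pos]; intro hc; exact h ((strip_eq_nil_iff l).mp hc)

lemma join_cons (a : List Char) (l : List (List Char)) (h : l ≠ []) :
    PySem.Chars.join ['\n'] (a :: l) = a ++ '\n' :: PySem.Chars.join ['\n'] l := by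
  cases l with
  | nil => exact absurd rfl h
  | cons b t => simp [PySem.Chars.join, List.intercalate, List.intersperse]

-- L3: a line whose pending prefix already contains a non-whitespace char gets the pad once
lemma nonblank_line (pad : List Char) (cs : List Char) :
    ∀ pre, ¬ pre.all PySem.Chars.isspace = true →
    PySem.Chars.join ['\n'] ((mySplit pre cs).map (gLine pad))
      = pad ++ pre ++ joinSeen pad cs := by
  induction cs with
  | nil =>
    intro pre h
    simp [mySplit, joinSeen, PySem.Chars.join, List.intercalate, gLine_nonblank pad pre h]
  | cons c r ih =>
    intro pre h
    by_cases hc : c = '\n'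
    · subst hc
      simp only [mySplit, if_true, List.map_cons, joinSeen]
      rw [join_cons _ _ (by simp [mySplit_ne_nil])]
      simp [gLine_nonblank pad pre h]
    · have h' : ¬ (pre ++ [c]).all PySem.Chars.isspace = true := by
        simp only [List.all_append, Bool.and_eq_true] at *
        tauto
      simp only [mySplit, if_neg hc, joinSeen]
      rw [ih (pre ++ [c]) h']
      simp

-- the main loop invariant, one induction over the characters covering both modes of B
lemma main_inv (pad : List Char) (cs : List Char) :
    ∀ out ws seen, ws.all PySem.Chars.isspace = true → (seen = true → ws = []) →
    (cs.foldl (altStep pad) (out, ws, seen)).1 ++ (cs.foldl (altStep pad) (out, ws, seen)).2.1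
      = out ++ (if seen then joinSeen pad cs
                else PySem.Chars.join ['\n'] ((mySplit ws cs).map (gLine pad))) := by
  induction cs with
  | nil =>
    intro out ws seen hws hs
    cases seen
    · simp [mySplit, PySem.Chars.join, List.intercalate, gLine_blank pad ws hws]
    · simp [joinSeen, hs rfl]
  | cons c r ih =>
    intro out ws seen hws hs
    cases seen with
    | false =>
      by_cases hc : c = '\n'
      · subst hc
        simp only [List.foldl_cons, altStep, if_true, Bool.not_false]
        rw [ih (out ++ ws ++ ['\n']) [] false (by simp) (by simp)]
        simp only [if_false, Bool.false_eq_true, mySplit, if_true, List.map_cons]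
        rw [join_cons _ _ (by simp [mySplit_ne_nil])]
        simp [gLine_blank pad ws hws]
      · by_cases hsp : PySem.Chars.isspace c = true
        · simp only [List.foldl_cons, altStep, if_neg hc, Bool.not_false, hsp,
            Bool.true_and, if_true]
          rw [ih out (ws ++ [c]) false (by simp [List.all_append, hws, hsp]) (by simp)]
          simp [mySplit, hc]
        · simp only [List.foldl_cons, altStep, if_neg hc, Bool.not_false, Bool.true_and,
            hsp, Bool.false_eq_true, if_false, if_true]
          rw [ih (out ++ pad ++ ws ++ [c]) [] true (by simp) (fun _ => rfl)]
          have hnb : ¬ (ws ++ [c]).all PySem.Chars.isspace = true := by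
            simp [List.all_append, hsp]
          simp only [if_true, mySplit, if_neg hc]
          rw [nonblank_line pad r (ws ++ [c]) hnb]
          simp
    | true =>
      have hws0 : ws = [] := hs rfl
      subst hws0
      by_cases hc : c = '\n'
      · subst hc
        simp only [List.foldl_cons, altStep, if_true]
        rw [ih (out ++ [] ++ ['\n']) [] false (by simp) (by simp)]
        simp [joinSeen]
      · simp only [List.foldl_cons, altStep, if_neg hc, Bool.not_true, Bool.false_and,
          Bool.false_eq_true, if_false]
        rw [ih (out ++ [c]) [] true (by simp) (fun _ => rfl)]
        simp [joinSeen, hc]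

-- ===== VERDICT (by name: the statement is the Claim_ definition above) =====
theorem add_source_indent_spec : Claim_equal_add_source_indent := by
  intro source indent _
  unfold Spec_add_source_indent add_source_indent add_source_indent_alt
  dsimp only
  rw [splitOn_eq, foldl_append_map]
  rw [main_inv (PySem.List.pyRepeat [' '] indent) source.toList [] [] false (by simp) (by simp)]
  simp
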